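-- pv_equiv track=rewrite | github.com/libbyyosef/Boggle | ex12_utils.py | check_path_coordinates
-- ===== SOURCE A (Python) =====
-- def check_path_coordinates(path, board):
--     """checks if a path is valid, if its rows and columns distance is at most
--     1 and that there is no double coordinate in the path"""
--     board_length = len(board)
--     if not path:
--         return None
--     for i in range(len(path) - 1):
--         path_i_1 = path[i][1]
--         path_i_0 = path[i][0]
--         if path_i_0 < 0 or path_i_1 < 0 or path_i_0 >= board_length or \
--                 path_i_1 >= board_length:
--             return False
--         if path.count(path[i]) != 1:
--             return False
--         if abs(path_i_0 - path[i + 1][0]) > 1: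
--             return False
--         if abs(path_i_1 - path[i + 1][1]) > 1:
--             return False
--     return bool(
--         path.count((path[-1])) == 1 and 0 <= path[-1][0] < board_length and
--         0 <= path[-1][1] < board_length)
-- ===== SOURCE B (Python) =====
-- def check_path_coordinates(path, board):
--     """checks if a path is valid, if its rows and columns distance is at most
--     1 and that there is no double coordinate in the path"""
--     if not path:
--         return None
--     n = len(board)
--     bounds = all(0 <= x < n and 0 <= y < n for x, y in path)
--     adjacent = all(abs(a[0] - b[0]) <= 1 and abs(a[1] - b[1]) <= 1
--                    for a, b in zip(path, path[1:]))
--     s = sorted(path)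
--     no_duplicate = all(a != b for a, b in zip(s, s[1:]))
--     return bool(bounds and adjacent and no_duplicate)
-- ===== Notes on version B (the rewrite author's own statement) =====
-- stated objective: simpler
-- what changed: A's single fused loop with early returns and a repeated path.count() scan per element is replaced by three independent whole-list passes: a bounds pass, an adjacency pass over zipped consecutive pairs, and a duplicate check that sorts a copy and scans it for an equal adjacent pair.
import Mathlib
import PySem

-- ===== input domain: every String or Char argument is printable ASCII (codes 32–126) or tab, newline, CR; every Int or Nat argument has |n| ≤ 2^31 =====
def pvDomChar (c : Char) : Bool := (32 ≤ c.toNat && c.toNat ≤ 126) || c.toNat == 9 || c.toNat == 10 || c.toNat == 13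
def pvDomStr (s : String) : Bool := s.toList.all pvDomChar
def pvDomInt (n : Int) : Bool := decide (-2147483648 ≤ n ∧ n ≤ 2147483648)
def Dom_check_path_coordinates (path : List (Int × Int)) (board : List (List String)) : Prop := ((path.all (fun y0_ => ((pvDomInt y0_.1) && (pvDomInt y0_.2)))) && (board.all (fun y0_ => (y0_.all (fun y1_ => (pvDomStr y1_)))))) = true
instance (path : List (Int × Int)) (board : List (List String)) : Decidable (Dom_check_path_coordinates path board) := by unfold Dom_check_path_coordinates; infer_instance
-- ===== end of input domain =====

-- B replaces A's fused early-exit loop (with its quadratic count() per element) by three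
-- independent whole-list passes — bounds, adjacency, and a sort-then-scan duplicate check;
-- objective: simpler. Return values are proved equal on the whole domain.

-- ===== PORT A =====
-- the body of A's `for i in range(len(path) - 1)` loop, recursing over the remaining indices;
-- falling off the loop reaches A's final `return bool(...)` (the `[]` case, with path[-1])
def pvAGoA (path : List (Int × Int)) (bl : Int) : List Int → Bool
  | [] =>
    match PySem.List.pyGet? path (-1) with
    | some last =>
        (PySem.List.count path last == 1) && decide (0 ≤ last.1) && decide (last.1 < bl)
          && decide (0 ≤ last.2) && decide (last.2 < bl)
    | none => false
  | i :: rest =>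
    match PySem.List.pyGet? path i, PySem.List.pyGet? path (i + 1) with
    | some pi, some pj =>
      if decide (pi.1 < 0) || decide (pi.2 < 0) || decide (bl ≤ pi.1) || decide (bl ≤ pi.2) then false
      else if PySem.List.count path pi != 1 then false
      else if decide (1 < |pi.1 - pj.1|) then false
      else if decide (1 < |pi.2 - pj.2|) then false
      else pvAGoA path bl rest
    | _, _ => false

def check_path_coordinates (path : List (Int × Int)) (board : List (List String)) : Option Bool :=
  let board_length : Int := board.length
  if path = [] then none
  else some (pvAGoA path board_length (PySem.List.pyRange 0 ((path.length : Int) - 1) 1))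

-- ===== PORT B =====
-- `path[1:]` / `s[1:]` is `.drop 1` (exact for the nonnegative literal slice start 1);
-- `sorted(path)` on int pairs is PySem.List.sorted2 with the two component keys
def check_path_coordinates_alt (path : List (Int × Int)) (board : List (List String)) : Option Bool :=
  if path = [] then none
  else
    let n : Int := board.length
    let bounds := path.all (fun p =>
      decide (0 ≤ p.1) && decide (p.1 < n) && decide (0 ≤ p.2) && decide (p.2 < n))
    let adjacent := (path.zip (path.drop 1)).all (fun ab =>
      decide (|ab.1.1 - ab.2.1| ≤ 1) && decide (|ab.1.2 - ab.2.2| ≤ 1))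
    let s := PySem.List.sorted2 path (fun p => p.1) (fun p => p.2)
    let no_duplicate := (s.zip (s.drop 1)).all (fun ab => ab.1 != ab.2)
    some (bounds && adjacent && no_duplicate)

-- ===== PRECONDITION & SPEC =====
def Spec_check_path_coordinates (path : List (Int × Int)) (board : List (List String)) (out : Option Bool) : Prop := out = check_path_coordinates_alt path board
instance (path : List (Int × Int)) (board : List (List String)) (out : Option Bool) : Decidable (Spec_check_path_coordinates path board out) := by unfold Spec_check_path_coordinates; infer_instance

-- ===== CLAIM (what is proved, stated in full; the proofs are below) =====
def Claim_equal_check_path_coordinates : Prop := ∀ (path : List (Int × Int)) (board : List (List String)), Dom_check_path_coordinates path board → Spec_check_path_coordinates path board (check_path_coordinates path board)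

-- ===== LEMMAS AND PROOFS =====

-- the per-index check of A's loop body, in isolation
def pvChk (path : List (Int × Int)) (bl : Int) (i : Int) : Bool :=
  match PySem.List.pyGet? path i, PySem.List.pyGet? path (i + 1) with
  | some pi, some pj =>
    !(decide (pi.1 < 0) || decide (pi.2 < 0) || decide (bl ≤ pi.1) || decide (bl ≤ pi.2))
      && (PySem.List.count path pi == 1)
      && decide (|pi.1 - pj.1| ≤ 1) && decide (|pi.2 - pj.2| ≤ 1)
  | _, _ => false

theorem pvAGoA_cons (path : List (Int × Int)) (bl : Int) (i : Int) (rest : List Int) :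
    pvAGoA path bl (i :: rest) = (pvChk path bl i && pvAGoA path bl rest) := by
  rw [pvAGoA, pvChk]
  cases PySem.List.pyGet? path i with
  | none => simp
  | some pi =>
    cases PySem.List.pyGet? path (i+1) with
    | none => simp
    | some pj =>
      dsimp only
      split_ifs with h1 h2 h3 h4 <;> simp_all <;> omega

theorem pvAGoA_eq_all (path : List (Int × Int)) (bl : Int) (is : List Int) :
    pvAGoA path bl is = (is.all (pvChk path bl) && pvAGoA path bl []) := by
  induction is with
  | nil => simp
  | cons i rest ih => rw [pvAGoA_cons, ih]; simp [Bool.and_assoc]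

-- the zip-with-tail pass visits exactly the adjacent pairs (IsChain)
theorem pvZipTailChain {α : Type} (Q : α × α → Prop) (l : List α) :
    (∀ ab ∈ l.zip (l.drop 1), Q ab) ↔ l.IsChain (fun a b => Q (a, b)) := by
  induction l with
  | nil => simp
  | cons a t ih =>
    cases t with
    | nil => simp
    | cons b t2 =>
      simp only [List.drop_succ_cons, List.drop_zero, List.zip_cons_cons,
        List.forall_mem_cons, List.isChain_cons_cons] at *
      tauto

theorem pvFoldlInsertBy_pairwise {α κ : Type} [LinearOrder κ] (key : α → κ) (xs : List α) (acc : List α)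
    (h : acc.Pairwise (fun a b => key a ≤ key b)) :
    (xs.foldl (fun acc x => PySem.List.insertBy (fun a b => decide (key a < key b)) x acc) acc).Pairwise
      (fun a b => key a ≤ key b) := by
  induction xs generalizing acc with
  | nil => exact h
  | cons x t ih => exact ih _ (PySem.List.insertBy_pairwise_le key x acc h)

-- Python's sort of int pairs is ordered by the lexicographic order on the pair
theorem pvSorted2_pairwise (xs : List (Int × Int)) :
    (PySem.List.sorted2 xs (fun p => p.1) (fun p => p.2)).Pairwise
      (fun a b => (toLex (a.1, a.2) : Int ×ₗ Int) ≤ toLex (b.1, b.2)) := by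
  have hbefore : (fun (a b : Int × Int) => decide (a.1 < b.1) || (!decide (b.1 < a.1) && decide (a.2 < b.2)))
      = (fun a b => decide ((toLex (a.1, a.2) : Int ×ₗ Int) < toLex (b.1, b.2))) := by
    funext a b
    rw [Bool.eq_iff_iff]
    simp [Prod.Lex.lt_iff]
    omega
  have : PySem.List.sorted2 xs (fun p => p.1) (fun p => p.2)
      = xs.foldl (fun acc x => PySem.List.insertBy
          (fun a b => decide ((fun p : Int × Int => (toLex (p.1, p.2) : Int ×ₗ Int)) a < (fun p : Int × Int => (toLex (p.1, p.2) : Int ×ₗ Int)) b)) x acc) [] := by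
    rw [PySem.List.sorted2]
    simp only [hbefore]
    rfl
  rw [this]
  exact pvFoldlInsertBy_pairwise (fun p : Int × Int => (toLex (p.1, p.2) : Int ×ₗ Int)) xs [] (by simp)

theorem pvPairwise_lt {α κ : Type} [LinearOrder κ] (key : α → κ) (hinj : Function.Injective key) :
    ∀ l : List α, l.Pairwise (fun a b => key a ≤ key b) → l.IsChain (fun a b => a ≠ b) →
      l.Pairwise (fun a b => key a < key b) := by
  intro l
  induction l with
  | nil => simp
  | cons a t ih =>
    intro hp hc
    rcases hp with _ | ⟨hle, hp⟩
    cases t with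
    | nil => simp
    | cons c t' =>
      rw [List.isChain_cons_cons] at hc
      have hpt := ih hp hc.2
      refine List.Pairwise.cons ?_ hpt
      intro b hb
      have hac : key a < key c :=
        lt_of_le_of_ne (hle c (by simp)) (fun h => hc.1 (hinj h))
      rcases List.mem_cons.mp hb with rfl | hb'
      · exact hac
      · exact lt_of_lt_of_le hac ((List.pairwise_cons.mp hp).1 b hb')

-- no equal adjacent pair in the sorted copy ↔ no duplicate anywhere
theorem pvSortedNodup (xs : List (Int × Int)) :
    (∀ ab ∈ (PySem.List.sorted2 xs (fun p => p.1) (fun p => p.2)).zip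
      ((PySem.List.sorted2 xs (fun p => p.1) (fun p => p.2)).drop 1),
        (ab.1 != ab.2) = true) ↔ xs.Nodup := by
  have hperm := PySem.List.sorted2_perm xs (fun p => p.1) (fun p => p.2) false
  set s := PySem.List.sorted2 xs (fun p => p.1) (fun p => p.2) with hs
  have key_inj : Function.Injective (fun p : Int × Int => (toLex (p.1, p.2) : Int ×ₗ Int)) := by
    intro a b h
    have := toLex.injective h
    exact Prod.ext (congrArg Prod.fst this) (congrArg Prod.snd this)
  rw [pvZipTailChain]
  constructor
  · intro hchain
    have hchain' : s.IsChain (fun a b => a ≠ b) := by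
      have := List.isChain_iff_getElem.mp hchain
      exact List.isChain_iff_getElem.mpr (fun i hi => by simpa using this i hi)
    have hlt := pvPairwise_lt _ key_inj s (pvSorted2_pairwise xs) hchain'
    have : s.Nodup := List.Pairwise.imp (fun h => fun heq => absurd (congrArg _ heq) (ne_of_lt h)) hlt
    exact hperm.nodup this
  · intro hnd
    have hsnd : s.Nodup := (hperm.symm).nodup hnd
    have := List.pairwise_iff_getElem.mp hsnd
    exact List.isChain_iff_getElem.mpr (fun i hi => by simpa using this i (i+1) (by omega) hi (by omega))

theorem pvGetNeg1 (path : List (Int × Int)) (h : 0 < path.length) :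
    PySem.List.pyGet? path (-1) = some (path[path.length - 1]'(by omega)) := by
  simp only [PySem.List.pyGet?, PySem.List.pyIdx?]
  norm_num
  rw [if_pos (by omega)]
  simp [List.getElem?_eq_getElem (by omega : path.length - 1 < path.length)]

-- the final `return bool(...)` of A, as a proposition
theorem pvBase (path : List (Int × Int)) (bl : Int) (h : 0 < path.length) :
    (pvAGoA path bl [] = true) ↔
      (List.count (path[path.length - 1]'(by omega)) path = 1 ∧
        0 ≤ (path[path.length - 1]'(by omega)).1 ∧ (path[path.length - 1]'(by omega)).1 < bl ∧
        0 ≤ (path[path.length - 1]'(by omega)).2 ∧ (path[path.length - 1]'(by omega)).2 < bl) := by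
  rw [pvAGoA, pvGetNeg1 path h]
  simp [PySem.List.count_eq, and_assoc]

-- the loop-body check at a natural index, as a proposition
theorem pvChkNat (path : List (Int × Int)) (bl : Int) (k : Nat) (h : k + 1 < path.length) :
    (pvChk path bl (k : Int) = true) ↔
      ((0 ≤ (path[k]'(by omega)).1 ∧ (path[k]'(by omega)).1 < bl ∧
        0 ≤ (path[k]'(by omega)).2 ∧ (path[k]'(by omega)).2 < bl) ∧
       List.count (path[k]'(by omega)) path = 1 ∧
       (|(path[k]'(by omega)).1 - (path[k+1]'h).1| ≤ 1 ∧
        |(path[k]'(by omega)).2 - (path[k+1]'h).2| ≤ 1)) := by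
  have h1 : PySem.List.pyGet? path (k : Int) = some (path[k]'(by omega)) := by
    rw [PySem.List.pyGet?_natCast]; exact List.getElem?_eq_getElem (by omega)
  have h2 : PySem.List.pyGet? path ((k : Int) + 1) = some (path[k+1]'h) := by
    have hc : ((k : Int) + 1) = ((k + 1 : Nat) : Int) := by push_cast; ring
    rw [hc, PySem.List.pyGet?_natCast]; exact List.getElem?_eq_getElem h
  rw [pvChk, h1, h2]
  simp [PySem.List.count_eq, and_assoc]
  omega

-- ===== VERDICT (by name: the statement is the Claim_ definition above) =====
theorem check_path_coordinates_spec : Claim_equal_check_path_coordinates := by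
  intro path board _
  unfold Spec_check_path_coordinates check_path_coordinates check_path_coordinates_alt
  by_cases hp : path = []
  · simp [hp]
  · have hn : 0 < path.length := List.length_pos_iff.mpr hp
    simp only [hp, if_false]
    congr 1
    rw [Bool.eq_iff_iff]
    rw [pvAGoA_eq_all, Bool.and_eq_true, List.all_eq_true]
    simp only [Bool.and_eq_true, List.all_eq_true]
    rw [pvBase path _ hn, pvZipTailChain, List.isChain_iff_getElem, pvSortedNodup,
      List.nodup_iff_count_eq_one]
    simp only [decide_eq_true_iff]
    set bl : Int := (board.length : Int) with hbl
    set n := path.length with hnlen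
    constructor
    · rintro ⟨hloop, hcl, hil⟩
      have hk : ∀ k : Nat, (hk1 : k + 1 < n) →
          ((0 ≤ (path[k]'(by omega)).1 ∧ (path[k]'(by omega)).1 < bl ∧
            0 ≤ (path[k]'(by omega)).2 ∧ (path[k]'(by omega)).2 < bl) ∧
           List.count (path[k]'(by omega)) path = 1 ∧
           (|(path[k]'(by omega)).1 - (path[k+1]'(by omega)).1| ≤ 1 ∧
            |(path[k]'(by omega)).2 - (path[k+1]'(by omega)).2| ≤ 1)) := by
        intro k hk1
        exact (pvChkNat path bl k hk1).mp
          (hloop (k : Int) (by rw [PySem.List.mem_pyRange_one]; omega))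
      have hAll : ∀ j : Nat, (hj : j < n) →
          (0 ≤ (path[j]'hj).1 ∧ (path[j]'hj).1 < bl ∧ 0 ≤ (path[j]'hj).2 ∧ (path[j]'hj).2 < bl) ∧
          List.count (path[j]'hj) path = 1 := by
        intro j hj
        rcases Nat.lt_or_ge (j + 1) n with hlt | hge
        · exact ⟨(hk j hlt).1, (hk j hlt).2.1⟩
        · have hj' : j = n - 1 := by omega
          subst hj'
          exact ⟨⟨hil.1, hil.2.1, hil.2.2.1, hil.2.2.2⟩, hcl⟩
      refine ⟨⟨?_, ?_⟩, ?_⟩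
      · intro x hx
        obtain ⟨j, hj, rfl⟩ := List.mem_iff_getElem.mp hx
        have := (hAll j hj).1
        tauto
      · intro i hi
        exact (hk i hi).2.2
      · intro a ha
        obtain ⟨j, hj, rfl⟩ := List.mem_iff_getElem.mp ha
        exact (hAll j hj).2
    · rintro ⟨⟨hb, hadj⟩, hcnt⟩
      refine ⟨?_, ?_, ?_⟩
      · intro i hi
        rw [PySem.List.mem_pyRange_one] at hi
        obtain ⟨hi0, hi1⟩ := hi
        lift i to ℕ using hi0 with k
        have hk1 : k + 1 < n := by omega
        refine (pvChkNat path bl k hk1).mpr ⟨?_, ?_, ?_⟩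
        · have := hb _ (List.getElem_mem (by omega : k < path.length))
          tauto
        · exact hcnt _ (List.getElem_mem (by omega))
        · exact hadj k hk1
      · exact hcnt _ (List.getElem_mem (by omega))
      · have := hb _ (List.getElem_mem (by omega : n - 1 < path.length))
        tauto
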